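-- pv_equiv track=rewrite | github.com/midasscheffers/olympiade-2020-2021 | a4.py | max_punten_voor_worp
-- ===== SOURCE A (Python) =====
-- punten = {"1":1, "2":2, "3":3, "4":4, "5":5, "w":5}
--
-- def letter_in_word(wrd):
--     letters = []
--     for letter in wrd:
--         letter_in_letters = False
--         for i in range(len(letters)):
--             if letters[i][0] == letter:
--                 letter_in_letters = True
--         if not letter_in_letters:
--             letters.append([letter, wrd.count(letter)])
--     return letters
--
-- def punten_voor_str(str):
--     totaal = 0
--     for letter in str:
--         if letter in punten:
--             totaal += punten[letter]
--     return totaal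
--
-- def max_punten_voor_worp(worp, nog_gooien, w_w_gelegd, letters_al_gegooid):
--     if worp == "" or nog_gooien == 0:
--         if not w_w_gelegd:
--             return -40
--         return 0
--
--     lis = []
--     te_worp = worp[:nog_gooien]
--     let_in_te_worp = letter_in_word(te_worp)
--     for i in range(len(let_in_te_worp)):
--         if let_in_te_worp[i][0] not in letters_al_gegooid:
--             n_gooien = nog_gooien - let_in_te_worp[i][1]
--             if let_in_te_worp[i][0] == "w":
--                 w_gelegd = True
--             else:
--                 w_gelegd = w_w_gelegd
--             let_geg = letters_al_gegooid + [let_in_te_worp[i][0]]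
--             lis.append(punten_voor_str(let_in_te_worp[i][0] * let_in_te_worp[i][1]) + max_punten_voor_worp(worp[nog_gooien:], n_gooien, w_gelegd, let_geg))
--     if len(lis) > 0:
--         max_punt = max(lis)
--     else:
--         max_punt = 0
--     return max_punt
-- ===== SOURCE B (Python) =====
-- PUNTEN = {"1": 1, "2": 2, "3": 3, "4": 4, "5": 5, "w": 5}
--
-- def max_punten_voor_worp(worp, nog_gooien, w_w_gelegd, letters_al_gegooid):
--     # Top-down memoized DP: identical subproblems (same remaining string, throws
--     # left, w-flag and SET of used letters) are solved once; the frozenset key is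
--     # sound because only membership of letters_al_gegooid is ever consulted.
--     cache = {}
--
--     def solve(worp, nog_gooien, w_w_gelegd, used):
--         if worp == "" or nog_gooien == 0:
--             return 0 if w_w_gelegd else -40
--         key = (worp, nog_gooien, w_w_gelegd, used)
--         if key in cache:
--             return cache[key]
--         counts = {}
--         for ch in worp[:nog_gooien]:
--             counts[ch] = counts.get(ch, 0) + 1
--         rest = worp[nog_gooien:]
--         vals = []
--         for ch, k in counts.items():
--             if ch not in used:
--                 vals.append(PUNTEN.get(ch, 0) * k +
--                             solve(rest, nog_gooien - k, ch == "w" or w_w_gelegd,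
--                                   used | {ch}))
--         res = max(vals, default=0)
--         cache[key] = res
--         return res
--
--     return solve(worp, nog_gooien, w_w_gelegd, frozenset(letters_al_gegooid))
-- ===== Notes on version B (the rewrite author's own statement) =====
-- stated objective: faster
-- what changed: B replaces A's pure exponential tree search by top-down memoized DP: a cache keyed by (remaining string, throws left, w-flag, frozenset of used letters) collapses repeated subproblems into one evaluation (sound because only membership of letters_al_gegooid is consulted), with a single-pass counts dict and closed-form letter scoring instead of A's quadratic distinct-letter scan and per-character scoring loop.
import Mathlib
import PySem

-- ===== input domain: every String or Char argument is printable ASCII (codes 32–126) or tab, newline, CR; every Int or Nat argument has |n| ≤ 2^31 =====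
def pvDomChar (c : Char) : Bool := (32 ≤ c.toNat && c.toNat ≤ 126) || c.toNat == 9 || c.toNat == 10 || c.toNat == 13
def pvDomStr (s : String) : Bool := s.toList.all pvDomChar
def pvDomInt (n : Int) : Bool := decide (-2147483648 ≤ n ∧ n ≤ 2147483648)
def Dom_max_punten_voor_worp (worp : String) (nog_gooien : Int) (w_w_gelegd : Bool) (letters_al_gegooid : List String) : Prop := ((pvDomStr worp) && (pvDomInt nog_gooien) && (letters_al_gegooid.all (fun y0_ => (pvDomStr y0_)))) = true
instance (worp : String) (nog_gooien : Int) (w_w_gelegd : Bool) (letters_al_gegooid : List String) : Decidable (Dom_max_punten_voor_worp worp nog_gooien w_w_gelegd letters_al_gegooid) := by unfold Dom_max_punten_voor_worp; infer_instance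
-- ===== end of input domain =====

-- B replaces A's pure exponential tree search by top-down memoized DP (a cache keyed by the state
-- with the used letters as a frozenset), with a single-pass counts dict and closed-form scoring.

-- ===== PORT A =====
-- Python dict 'punten' has the 1-char string keys "1".."5","w" and every key ever looked up is a
-- single character, so it is represented exactly as a Char-keyed dict.
def pvPunten : PySem.Dict Char Int :=
  PySem.Dict.ofList [('1', 1), ('2', 2), ('3', 3), ('4', 4), ('5', 5), ('w', 5)]

-- Python's heterogeneous pair [letter, wrd.count(letter)] is the pair (Char × Int);
-- str.count of a single-character needle is exactly the character count (List.count).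
def letter_in_word (wrd : List Char) : List (Char × Int) :=
  wrd.foldl (fun letters letter =>
    let flag := (List.range letters.length).foldl
      (fun f i => if (letters.getD i (' ', 0)).1 == letter then true else f) false
    if !flag then letters ++ [(letter, (wrd.count letter : Int))] else letters) []

def punten_voor_str (s : List Char) : Int :=
  s.foldl (fun totaal letter =>
    if pvPunten.contains letter then totaal + pvPunten.getD letter 0 else totaal) 0

-- fuel only makes the recursion total (A always terminates); 2*len+2 always suffices: every
-- recursive call strictly decreases the measure 2*len + (if nog_gooien < 0 then 0 else 1) + 1,
-- which is at most 2*len+2 (proved below as pv_mu_child).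
def max_punten_voor_worp_go : Nat → List Char → Int → Bool → List String → Int
  | 0, _, _, _, _ => 0  -- unreachable with the fuel supplied below
  | fuel + 1, worp, nog_gooien, w_w_gelegd, letters_al_gegooid =>
    if worp = [] ∨ nog_gooien = 0 then
      if !w_w_gelegd then -40 else 0
    else
      let te_worp := PySem.List.slice worp none (some nog_gooien)
      let liw := letter_in_word te_worp
      let lis := (List.range liw.length).foldl (fun lis i =>
        let p := liw.getD i (' ', 0)      -- in range: i < len(liw)
        if !(letters_al_gegooid.contains (String.ofList [p.1])) then
          let n_gooien := nog_gooien - p.2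
          let w_gelegd := if p.1 == 'w' then true else w_w_gelegd
          let let_geg := letters_al_gegooid ++ [String.ofList [p.1]]
          -- letter * count with count ≥ 1; .toNat is exact (Python's str*int is empty for int ≤ 0)
          lis ++ [punten_voor_str (List.replicate p.2.toNat p.1) +
                  max_punten_voor_worp_go fuel (PySem.List.slice worp (some nog_gooien) none)
                    n_gooien w_gelegd let_geg]
        else lis) []
      if lis.length > 0 then (PySem.List.max? lis (fun x => x)).getD 0 else 0

def max_punten_voor_worp (worp : String) (nog_gooien : Int) (w_w_gelegd : Bool) (letters_al_gegooid : List String) : Int :=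
  max_punten_voor_worp_go (2 * worp.toList.length + 2) worp.toList nog_gooien w_w_gelegd letters_al_gegooid

-- ===== PORT B =====
def pvPUNTEN : PySem.Dict Char Int :=
  PySem.Dict.ofList [('1', 1), ('2', 2), ('3', 3), ('4', 4), ('5', 5), ('w', 5)]

-- dict lookup on the frozenset-keyed cache compares keys componentwise with frozenset equality
-- (= set equality) on the used-letters component
def pvKeyEq (a b : List Char × Int × Bool × List String) : Bool :=
  a.1 == b.1 && a.2.1 == b.2.1 && a.2.2.1 == b.2.2.1 && PySem.Set.equal a.2.2.2 b.2.2.2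

-- Source B's memoized solver: 'used' is the frozenset (PySem.Set) of used letters, the cache is the
-- memo dict (association list in insertion order, looked up with pvKeyEq, appended on miss)
-- threaded through the recursion; the fuel only makes the recursion total (same bound as A's port).
def pv_solve : Nat → List Char → Int → Bool → List String →
    List ((List Char × Int × Bool × List String) × Int) →
    Int × List ((List Char × Int × Bool × List String) × Int)
  | 0, _, _, _, _, cache => (0, cache)  -- unreachable with the fuel supplied below
  | fuel + 1, worp, n, w, used, cache =>
    if worp = [] ∨ n = 0 then ((if w then 0 else -40), cache)
    else
      match cache.find? (fun e => pvKeyEq e.1 (worp, n, w, used)) with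
      | some e => (e.2, cache)
      | none =>
        -- counts[ch] = counts.get(ch, 0) + 1 over worp[:n]
        let counts := (PySem.List.slice worp none (some n)).foldl
          (fun d ch => d.insert ch (d.getD ch 0 + 1)) PySem.Dict.empty
        let rest := PySem.List.slice worp (some n) none
        -- for ch, k in counts.items(): if ch not in used: vals.append(value*k + solve(...))
        let st := counts.items.foldl
          (fun (st : List Int × List ((List Char × Int × Bool × List String) × Int)) p =>
            if !(used.contains (String.ofList [p.1])) then
              let r := pv_solve fuel rest (n - p.2) (p.1 == 'w' || w)
                         (PySem.Set.add used (String.ofList [p.1])) st.2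
              (st.1 ++ [pvPUNTEN.getD p.1 0 * p.2 + r.1], r.2)
            else st) ([], cache)
        let res := (PySem.List.max? st.1 (fun x => x)).getD 0
        (res, st.2 ++ [((worp, n, w, used), res)])

def max_punten_voor_worp_alt (worp : String) (nog_gooien : Int) (w_w_gelegd : Bool) (letters_al_gegooid : List String) : Int :=
  (pv_solve (2 * worp.toList.length + 2) worp.toList nog_gooien w_w_gelegd
    (PySem.Set.ofList letters_al_gegooid) []).1

-- ===== PRECONDITION & SPEC =====
def Spec_max_punten_voor_worp (worp : String) (nog_gooien : Int) (w_w_gelegd : Bool) (letters_al_gegooid : List String) (out : Int) : Prop := out = max_punten_voor_worp_alt worp nog_gooien w_w_gelegd letters_al_gegooid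
instance (worp : String) (nog_gooien : Int) (w_w_gelegd : Bool) (letters_al_gegooid : List String) (out : Int) : Decidable (Spec_max_punten_voor_worp worp nog_gooien w_w_gelegd letters_al_gegooid out) := by unfold Spec_max_punten_voor_worp; infer_instance

-- ===== CLAIM (what is proved, stated in full; the proofs are below) =====
def Claim_equal_max_punten_voor_worp : Prop := ∀ (worp : String) (nog_gooien : Int) (w_w_gelegd : Bool) (letters_al_gegooid : List String), Dom_max_punten_voor_worp worp nog_gooien w_w_gelegd letters_al_gegooid → Spec_max_punten_voor_worp worp nog_gooien w_w_gelegd letters_al_gegooid (max_punten_voor_worp worp nog_gooien w_w_gelegd letters_al_gegooid)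

-- ===== LEMMAS AND PROOFS =====

-- the plain (non-memoized) version of B's per-node computation, a proof-only intermediate:
-- A's port is first shown equal to it fuel-for-fuel, and the memoized solver is shown to
-- compute its fuel-independent value
def pv_plain_go : Nat → List Char → Int → Bool → List String → Int
  | 0, _, _, _, _ => 0
  | fuel + 1, worp, n, w, used =>
    if worp = [] ∨ n = 0 then
      (if w then 0 else -40)
    else
      let counts := (PySem.List.slice worp none (some n)).foldl
        (fun d ch => d.insert ch (d.getD ch 0 + 1)) PySem.Dict.empty
      let rest := PySem.List.slice worp (some n) none
      (PySem.List.max?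
        ((counts.items.filter (fun p => !(used.contains (String.ofList [p.1])))).map
          (fun p => pvPUNTEN.getD p.1 0 * p.2 +
            pv_plain_go fuel rest (n - p.2) (p.1 == 'w' || w) (used ++ [String.ofList [p.1]])))
        (fun x => x)).getD 0

-- the recursion measure: strictly decreases along every recursive call (pv_mu_child)
def pvMu (worp : List Char) (n : Int) : Nat :=
  2 * worp.length + (if n < 0 then 0 else 1) + 1

-- the fuel-independent value of the recursion (pv_plain_go with just enough fuel)
def pvVal (worp : List Char) (n : Int) (w : Bool) (used : List String) : Int :=
  pv_plain_go (pvMu worp n) worp n w used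

-- every cache entry stores the true value of its key
def pvGood (cache : List ((List Char × Int × Bool × List String) × Int)) : Prop :=
  ∀ e ∈ cache, e.2 = pvVal e.1.1 e.1.2.1 e.1.2.2.1 e.1.2.2.2

-- a loop 'for i in range(len(xs)): … xs[i] …' is a fold over xs itself
theorem pv_foldl_range_getD {α β : Type} (xs : List α) (d : α) (g : β → α → β) (init : β) :
    (List.range xs.length).foldl (fun acc i => g acc (xs.getD i d)) init = xs.foldl g init := by
  induction xs generalizing init with
  | nil => simp
  | cons x xs ih =>
    simp only [List.length_cons, List.range_succ_eq_map, List.foldl_cons, List.foldl_map,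
      List.getD_cons_zero, List.getD_cons_succ]
    exact ih (g init x)

-- letter_in_word's loop, with the accumulator generalized to any set of already-seen letters
theorem pv_lw_aux (f : Char → Int) (l : List Char) : ∀ (s : PySem.Set Char),
    l.foldl (fun letters letter =>
      let flag := (List.range letters.length).foldl
        (fun fl i => if (letters.getD i (' ', 0)).1 == letter then true else fl) false
      if !flag then letters ++ [(letter, f letter)] else letters)
      (s.map (fun c => (c, f c))) =
    (l.foldl PySem.Set.add s).map (fun c => (c, f c)) := by
  induction l with
  | nil => intro s; rfl
  | cons c l ih =>
    intro s
    simp only [List.foldl_cons]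
    rw [pv_foldl_range_getD (g := fun fl (p : Char × Int) => if p.1 == c then true else fl),
      PySem.List.foldl_if_true_eq]
    have hany : (s.map (fun c => (c, f c))).any (fun p => p.1 == c) = s.contains c := by
      rw [List.any_map]
      simpa using List.any_beq' (l := s) (a := c)
    rw [hany]
    by_cases hc : s.contains c = true
    · have hmem : c ∈ s := by simpa using hc
      rw [show PySem.Set.add s c = s from by simp [PySem.Set.add, hmem]]
      simpa [hc, hmem] using ih s
    · simp only [Bool.not_eq_true] at hc
      have hmem : c ∉ s := by simpa using hc
      rw [show PySem.Set.add s c = s ++ [c] from by simp [PySem.Set.add, hmem]]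
      simpa [hc, hmem] using ih (s ++ [c])

-- A's distinct-letters list is the first-occurrence set paired with full counts
theorem pv_letter_in_word_eq (l : List Char) :
    letter_in_word l = (PySem.Set.ofList l).map (fun c => (c, (l.count c : Int))) := by
  rw [PySem.Set.ofList_eq_foldl]
  unfold letter_in_word
  simpa using pv_lw_aux (fun c => (l.count c : Int)) l []

-- A's scoring loop on letter*count is value × count in closed form
theorem pv_punten_voor_str_replicate (k : Nat) (c : Char) :
    punten_voor_str (List.replicate k c) = (k : Int) * pvPunten.getD c 0 := by
  unfold punten_voor_str
  have hstep : ∀ (t : Int) (letter : Char),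
      (if pvPunten.contains letter then t + pvPunten.getD letter 0 else t)
        = t + pvPunten.getD letter 0 := by
    intro t letter
    by_cases h : pvPunten.contains letter = true
    · simp [h]
    · simp only [Bool.not_eq_true] at h
      simp [h, PySem.Dict.getD_of_not_contains _ _ h]
  rw [show (List.replicate k c).foldl
        (fun totaal letter =>
          if pvPunten.contains letter then totaal + pvPunten.getD letter 0 else totaal) 0
      = (List.replicate k c).foldl (fun totaal letter => totaal + pvPunten.getD letter 0) 0 from
    PySem.List.foldl_congr_mem _ _ _ 0 (fun acc x _ => hstep acc x)]
  rw [PySem.List.foldl_add]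
  simp [List.sum_replicate]

-- A's port equals the plain version of B's per-node computation, fuel for fuel
theorem pv_go_eq (fuel : Nat) : ∀ (worp : List Char) (nog_gooien : Int) (w_w_gelegd : Bool)
    (geg : List String),
    max_punten_voor_worp_go fuel worp nog_gooien w_w_gelegd geg =
      pv_plain_go fuel worp nog_gooien w_w_gelegd geg := by
  induction fuel with
  | zero => intro _ _ _ _; rfl
  | succ fuel ih =>
    intro worp n b geg
    simp only [max_punten_voor_worp_go, pv_plain_go]
    by_cases hbase : worp = [] ∨ n = 0
    · simp only [if_pos hbase]; cases b <;> rfl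
    · simp only [if_neg hbase]
      rw [pv_foldl_range_getD (g := fun lis (p : Char × Int) =>
        if !(geg.contains (String.ofList [p.1])) then
          lis ++ [punten_voor_str (List.replicate p.2.toNat p.1) +
            max_punten_voor_worp_go fuel (PySem.List.slice worp (some n) none)
              (n - p.2) (if p.1 == 'w' then true else b) (geg ++ [String.ofList [p.1]])]
        else lis)]
      rw [PySem.List.foldl_append_if]
      rw [pv_letter_in_word_eq, List.filter_map, List.map_map]
      rw [PySem.Dict.foldl_insert_getD_add_one_eq_counter, PySem.Dict.items_counter,
        List.filter_map, List.map_map]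
      set te := PySem.List.slice worp none (some n) with hte
      set L := (PySem.Set.ofList te).filter
        ((fun p : Char × Int => !(geg.contains (String.ofList [p.1]))) ∘
          (fun c => (c, (te.count c : Int)))) with hL
      have hmap : L.map ((fun p : Char × Int =>
            punten_voor_str (List.replicate p.2.toNat p.1) +
              max_punten_voor_worp_go fuel (PySem.List.slice worp (some n) none)
                (n - p.2) (if p.1 == 'w' then true else b) (geg ++ [String.ofList [p.1]])) ∘
            (fun c => (c, (te.count c : Int))))
          = L.map ((fun p : Char × Int => pvPUNTEN.getD p.1 0 * p.2 +
              pv_plain_go fuel (PySem.List.slice worp (some n) none)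
                (n - p.2) (p.1 == 'w' || b) (geg ++ [String.ofList [p.1]])) ∘
            (fun c => (c, (te.count c : Int)))) := by
        apply List.map_congr_left
        intro c _
        simp only [Function.comp]
        rw [Int.toNat_natCast, pv_punten_voor_str_replicate, ih]
        have hb : (if c == 'w' then true else b) = (c == 'w' || b) := by
          cases h : c == 'w' <;> simp [h]
        rw [hb, mul_comm]
        rfl
      rw [hmap]
      cases hLL : L.map ((fun p : Char × Int => pvPUNTEN.getD p.1 0 * p.2 +
              pv_plain_go fuel (PySem.List.slice worp (some n) none)
                (n - p.2) (p.1 == 'w' || b) (geg ++ [String.ofList [p.1]])) ∘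
            (fun c => (c, (te.count c : Int)))) with
      | nil => simp [PySem.List.max?]
      | cons x xs => simp

-- the measure strictly decreases along every recursive call of the node computation
theorem pv_mu_child (worp : List Char) (n : Int) (c : Char) (k : Int)
    (hbase : ¬ (worp = [] ∨ n = 0))
    (hc : c ∈ PySem.List.slice worp none (some n)) (hk : 1 ≤ k) :
    pvMu (PySem.List.slice worp (some n) none) (n - k) < pvMu worp n := by
  push_neg at hbase
  obtain ⟨hw, hn⟩ := hbase
  have hlen : 0 < worp.length := List.length_pos_of_ne_nil hw
  unfold pvMu
  rcases lt_trichotomy n 0 with hneg | hz | hpos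
  · have hmpos : 0 < (-n).toNat := by omega
    have hneq : n = -(((-n).toNat : Nat) : Int) := by omega
    rw [hneq] at hc ⊢
    rw [PySem.List.slice_to_neg_natCast _ _ hmpos] at hc
    rw [PySem.List.slice_from_neg_natCast _ _ hmpos, List.length_drop]
    have hne : 0 < (worp.take (worp.length - (-n).toNat)).length :=
      List.length_pos_of_ne_nil (List.ne_nil_of_mem hc)
    rw [List.length_take] at hne
    split_ifs <;> omega
  · exact absurd hz hn
  · rw [PySem.List.slice_from _ (le_of_lt hpos), List.length_drop]
    have : 1 ≤ n.toNat := by omega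
    split_ifs <;> omega

-- membership in the counts dict's items gives the letter with its (positive) count
theorem pv_mem_counter_items (te : List Char) (p : Char × Int)
    (hp : p ∈ (PySem.Dict.counter te).items) :
    p.1 ∈ te ∧ p.2 = (te.count p.1 : Int) ∧ 1 ≤ p.2 := by
  rw [PySem.Dict.items_counter] at hp
  obtain ⟨c, hc, rfl⟩ := List.mem_map.mp hp
  have hmem : c ∈ te := (PySem.Set.mem_ofList _ _).mp hc
  have hcount : 0 < te.count c := List.count_pos_iff.mpr hmem
  refine ⟨hmem, rfl, ?_⟩
  show (1 : Int) ≤ (te.count c : Int)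
  exact_mod_cast hcount

-- enough fuel: the plain recursion is fuel-independent above the measure
theorem pv_plain_mono : ∀ (f g : Nat) (worp : List Char) (n : Int) (w : Bool) (u : List String),
    pvMu worp n ≤ f → f ≤ g →
    pv_plain_go f worp n w u = pv_plain_go g worp n w u := by
  intro f
  induction f with
  | zero => intro g worp n w u hμ _; exfalso; unfold pvMu at hμ; omega
  | succ f ih =>
    intro g worp n w u hμ hfg
    obtain ⟨g', rfl⟩ : ∃ g', g = g' + 1 := ⟨g - 1, by omega⟩
    simp only [pv_plain_go]
    by_cases hbase : worp = [] ∨ n = 0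
    · simp [hbase]
    · simp only [if_neg hbase]
      rw [PySem.Dict.foldl_insert_getD_add_one_eq_counter]
      have hmap : ((PySem.Dict.counter (PySem.List.slice worp none (some n))).items.filter
            (fun p => !(u.contains (String.ofList [p.1])))).map
          (fun p => pvPUNTEN.getD p.1 0 * p.2 +
            pv_plain_go f (PySem.List.slice worp (some n) none) (n - p.2) (p.1 == 'w' || w)
              (u ++ [String.ofList [p.1]]))
          = ((PySem.Dict.counter (PySem.List.slice worp none (some n))).items.filter
            (fun p => !(u.contains (String.ofList [p.1])))).map
          (fun p => pvPUNTEN.getD p.1 0 * p.2 +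
            pv_plain_go g' (PySem.List.slice worp (some n) none) (n - p.2) (p.1 == 'w' || w)
              (u ++ [String.ofList [p.1]])) := by
        apply List.map_congr_left
        intro p hp
        obtain ⟨hc, -, hk⟩ := pv_mem_counter_items _ _ (List.mem_of_mem_filter hp)
        have hchild := pv_mu_child worp n p.1 p.2 hbase hc hk
        rw [ih g' (PySem.List.slice worp (some n) none) (n - p.2) (p.1 == 'w' || w)
          (u ++ [String.ofList [p.1]]) (by omega) (by omega)]
      rw [hmap]

theorem pv_plain_suff (f : Nat) (worp : List Char) (n : Int) (w : Bool) (u : List String)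
    (h : pvMu worp n ≤ f) : pv_plain_go f worp n w u = pvVal worp n w u :=
  (pv_plain_mono (pvMu worp n) f worp n w u le_rfl h).symm

-- the recursion only consults membership of the used-letters list
theorem pv_plain_used_inv : ∀ (f : Nat) (worp : List Char) (n : Int) (w : Bool)
    (u u' : List String), (∀ s : String, s ∈ u ↔ s ∈ u') →
    pv_plain_go f worp n w u = pv_plain_go f worp n w u' := by
  intro f
  induction f with
  | zero => intro _ _ _ _ _ _; rfl
  | succ f ih =>
    intro worp n w u u' h
    have hcont : ∀ s : String, u.contains s = u'.contains s := by
      intro s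
      by_cases hs : s ∈ u
      · have hs' : s ∈ u' := (h s).mp hs
        simp [hs, hs', List.contains_iff_mem]
      · have hs' : s ∉ u' := fun hx => hs ((h s).mpr hx)
        simp [hs, hs', List.contains_iff_mem]
    simp only [pv_plain_go]
    by_cases hbase : worp = [] ∨ n = 0
    · simp [hbase]
    · simp only [if_neg hbase]
      rw [List.filter_congr (fun p _ => by rw [hcont (String.ofList [p.1])])]
      have hmap : ∀ L : List (Char × Int), L.map
          (fun p => pvPUNTEN.getD p.1 0 * p.2 +
            pv_plain_go f (PySem.List.slice worp (some n) none) (n - p.2) (p.1 == 'w' || w)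
              (u ++ [String.ofList [p.1]]))
          = L.map (fun p => pvPUNTEN.getD p.1 0 * p.2 +
            pv_plain_go f (PySem.List.slice worp (some n) none) (n - p.2) (p.1 == 'w' || w)
              (u' ++ [String.ofList [p.1]])) := by
        intro L
        apply List.map_congr_left
        intro p _
        rw [ih _ _ _ (u ++ [String.ofList [p.1]]) (u' ++ [String.ofList [p.1]])
          (fun s => by simp only [List.mem_append]; rw [h s])]
      rw [hmap]

theorem pv_val_used_inv (worp : List Char) (n : Int) (w : Bool) (u u' : List String)
    (h : ∀ s : String, s ∈ u ↔ s ∈ u') : pvVal worp n w u = pvVal worp n w u' :=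
  pv_plain_used_inv _ _ _ _ _ _ h

-- one unfolding of the fuel-independent value
theorem pv_val_unfold (worp : List Char) (n : Int) (w : Bool) (u : List String) :
    pvVal worp n w u =
      if worp = [] ∨ n = 0 then (if w then 0 else -40)
      else
        (PySem.List.max?
          (((((PySem.List.slice worp none (some n)).foldl
              (fun d ch => d.insert ch (d.getD ch 0 + 1)) PySem.Dict.empty).items.filter
                (fun p => !(u.contains (String.ofList [p.1])))).map
            (fun p => pvPUNTEN.getD p.1 0 * p.2 +
              pvVal (PySem.List.slice worp (some n) none) (n - p.2) (p.1 == 'w' || w)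
                (u ++ [String.ofList [p.1]]))))
          (fun x => x)).getD 0 := by
  conv_lhs => rw [pvVal, pvMu]
  rw [pv_plain_go]
  by_cases hbase : worp = [] ∨ n = 0
  · simp [hbase]
  · simp only [if_neg hbase]
    rw [PySem.Dict.foldl_insert_getD_add_one_eq_counter]
    have hmap : ((PySem.Dict.counter (PySem.List.slice worp none (some n))).items.filter
          (fun p => !(u.contains (String.ofList [p.1])))).map
        (fun p => pvPUNTEN.getD p.1 0 * p.2 +
          pv_plain_go (2 * worp.length + (if n < 0 then 0 else 1))
            (PySem.List.slice worp (some n) none) (n - p.2) (p.1 == 'w' || w)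
            (u ++ [String.ofList [p.1]]))
        = ((PySem.Dict.counter (PySem.List.slice worp none (some n))).items.filter
          (fun p => !(u.contains (String.ofList [p.1])))).map
        (fun p => pvPUNTEN.getD p.1 0 * p.2 +
          pvVal (PySem.List.slice worp (some n) none) (n - p.2) (p.1 == 'w' || w)
            (u ++ [String.ofList [p.1]])) := by
      apply List.map_congr_left
      intro p hp
      obtain ⟨hc, -, hk⟩ := pv_mem_counter_items _ _ (List.mem_of_mem_filter hp)
      have hchild := pv_mu_child worp n p.1 p.2 hbase hc hk
      have hpm : pvMu worp n = 2 * worp.length + (if n < 0 then 0 else 1) + 1 := rfl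
      rw [pv_plain_suff _ _ _ _ _ (by omega)]
    rw [hmap]

-- the children loop of the memoized solver: collects the children's true values and keeps the
-- cache truthful (stated with the fuel-f induction hypothesis as an assumption)
theorem pv_loop (f : Nat) (rest : List Char) (n : Int) (w : Bool) (u : List String)
    (ih : ∀ (worp' : List Char) (n' : Int) (w' : Bool) (u' : List String)
      (cache : List ((List Char × Int × Bool × List String) × Int)),
      pvMu worp' n' ≤ f → pvGood cache →
      (pv_solve f worp' n' w' u' cache).1 = pvVal worp' n' w' u' ∧
        pvGood (pv_solve f worp' n' w' u' cache).2) :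
    ∀ (L : List (Char × Int)) (vals0 : List Int)
      (cache : List ((List Char × Int × Bool × List String) × Int)),
    pvGood cache → (∀ p ∈ L, pvMu rest (n - p.2) ≤ f) →
    (L.foldl (fun (st : List Int × List ((List Char × Int × Bool × List String) × Int)) p =>
        if !(u.contains (String.ofList [p.1])) then
          (st.1 ++ [pvPUNTEN.getD p.1 0 * p.2 +
            (pv_solve f rest (n - p.2) (p.1 == 'w' || w)
              (PySem.Set.add u (String.ofList [p.1])) st.2).1],
           (pv_solve f rest (n - p.2) (p.1 == 'w' || w)
              (PySem.Set.add u (String.ofList [p.1])) st.2).2)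
        else st) (vals0, cache)).1
      = vals0 ++ (L.filter (fun p => !(u.contains (String.ofList [p.1])))).map
          (fun p => pvPUNTEN.getD p.1 0 * p.2 +
            pvVal rest (n - p.2) (p.1 == 'w' || w) (PySem.Set.add u (String.ofList [p.1]))) ∧
    pvGood (L.foldl (fun (st : List Int × List ((List Char × Int × Bool × List String) × Int)) p =>
        if !(u.contains (String.ofList [p.1])) then
          (st.1 ++ [pvPUNTEN.getD p.1 0 * p.2 +
            (pv_solve f rest (n - p.2) (p.1 == 'w' || w)
              (PySem.Set.add u (String.ofList [p.1])) st.2).1],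
           (pv_solve f rest (n - p.2) (p.1 == 'w' || w)
              (PySem.Set.add u (String.ofList [p.1])) st.2).2)
        else st) (vals0, cache)).2 := by
  intro L
  induction L with
  | nil => intro vals0 cache hgood _; exact ⟨(List.append_nil _).symm, hgood⟩
  | cons p L ihL =>
    intro vals0 cache hgood hb
    simp only [List.foldl_cons, List.filter_cons]
    by_cases hp : (!(u.contains (String.ofList [p.1]))) = true
    · simp only [if_pos hp]
      obtain ⟨h1, h2⟩ := ih rest (n - p.2) (p.1 == 'w' || w)
        (PySem.Set.add u (String.ofList [p.1])) cache (hb p List.mem_cons_self) hgood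
      obtain ⟨h3, h4⟩ := ihL
        (vals0 ++ [pvPUNTEN.getD p.1 0 * p.2 +
          (pv_solve f rest (n - p.2) (p.1 == 'w' || w)
            (PySem.Set.add u (String.ofList [p.1])) cache).1])
        ((pv_solve f rest (n - p.2) (p.1 == 'w' || w)
            (PySem.Set.add u (String.ofList [p.1])) cache).2)
        h2 (fun q hq => hb q (List.mem_cons_of_mem _ hq))
      refine ⟨?_, h4⟩
      rw [h3, h1, List.map_cons, List.append_assoc]
      rfl
    · simp only [if_neg hp]
      exact ihL vals0 cache hgood (fun q hq => hb q (List.mem_cons_of_mem _ hq))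

-- the memoized solver computes the fuel-independent value and keeps the cache truthful
theorem pv_solve_eq : ∀ (f : Nat) (worp : List Char) (n : Int) (w : Bool) (u : List String)
    (cache : List ((List Char × Int × Bool × List String) × Int)),
    pvMu worp n ≤ f → pvGood cache →
    (pv_solve f worp n w u cache).1 = pvVal worp n w u ∧
      pvGood (pv_solve f worp n w u cache).2 := by
  intro f
  induction f with
  | zero => intro worp n w u cache hμ _; exfalso; unfold pvMu at hμ; omega
  | succ f ih =>
    intro worp n w u cache hμ hg
    by_cases hbase : worp = [] ∨ n = 0
    · simp only [pv_solve, if_pos hbase]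
      refine ⟨?_, hg⟩
      rw [pv_val_unfold]
      simp [hbase]
    · simp only [pv_solve, if_neg hbase]
      cases hfind : cache.find? (fun e => pvKeyEq e.1 (worp, n, w, u)) with
      | some e =>
        simp only []
        have hmem : e ∈ cache := List.mem_of_find?_eq_some hfind
        have hkey := List.find?_some hfind
        simp only [] at hkey
        unfold pvKeyEq at hkey
        simp only [Bool.and_eq_true, beq_iff_eq] at hkey
        obtain ⟨⟨⟨h1, h2⟩, h3⟩, h4⟩ := hkey
        refine ⟨?_, hg⟩
        rw [hg e hmem, h1, h2, h3]
        exact pv_val_used_inv _ _ _ _ _ ((PySem.Set.equal_iff _ _).mp h4)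
      | none =>
        simp only []
        rw [PySem.Dict.foldl_insert_getD_add_one_eq_counter]
        have hbound : ∀ p ∈ (PySem.Dict.counter (PySem.List.slice worp none (some n))).items,
            pvMu (PySem.List.slice worp (some n) none) (n - p.2) ≤ f := by
          intro p hp
          obtain ⟨hc, -, hk⟩ := pv_mem_counter_items _ _ hp
          have := pv_mu_child worp n p.1 p.2 hbase hc hk
          omega
        obtain ⟨h1, h2⟩ := pv_loop f (PySem.List.slice worp (some n) none) n w u ih
          (PySem.Dict.counter (PySem.List.slice worp none (some n))).items [] cache hg hbound
        have hres : (PySem.List.max?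
            (((PySem.Dict.counter (PySem.List.slice worp none (some n))).items.foldl
              (fun (st : List Int × List ((List Char × Int × Bool × List String) × Int)) p =>
                if !(u.contains (String.ofList [p.1])) then
                  (st.1 ++ [pvPUNTEN.getD p.1 0 * p.2 +
                    (pv_solve f (PySem.List.slice worp (some n) none) (n - p.2) (p.1 == 'w' || w)
                      (PySem.Set.add u (String.ofList [p.1])) st.2).1],
                   (pv_solve f (PySem.List.slice worp (some n) none) (n - p.2) (p.1 == 'w' || w)
                      (PySem.Set.add u (String.ofList [p.1])) st.2).2)
                else st) ([], cache)).1) (fun x => x)).getD 0 = pvVal worp n w u := by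
          rw [h1, List.nil_append, pv_val_unfold]
          simp only [if_neg hbase]
          rw [PySem.Dict.foldl_insert_getD_add_one_eq_counter]
          congr 2
          apply List.map_congr_left
          intro p _
          rw [pv_val_used_inv (PySem.List.slice worp (some n) none) (n - p.2)
            (p.1 == 'w' || w) (PySem.Set.add u (String.ofList [p.1]))
            (u ++ [String.ofList [p.1]])
            (fun s => by simp [PySem.Set.mem_add])]
        refine ⟨hres, ?_⟩
        intro e he
        rcases List.mem_append.mp he with he' | he'
        · exact h2 e he'
        · rw [List.mem_singleton] at he'
          subst he'
          exact hres

-- ===== VERDICT (by name: the statement is the Claim_ definition above) =====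
theorem max_punten_voor_worp_spec : Claim_equal_max_punten_voor_worp := by
  intro worp n w geg _
  unfold Spec_max_punten_voor_worp max_punten_voor_worp max_punten_voor_worp_alt
  have hmu : pvMu worp.toList n ≤ 2 * worp.toList.length + 2 := by
    unfold pvMu; split <;> omega
  rw [pv_go_eq, pv_plain_suff _ _ _ _ _ hmu,
    (pv_solve_eq _ _ _ _ _ [] hmu (by intro e he; cases he)).1]
  exact pv_val_used_inv _ _ _ _ _ (fun s => by simp [PySem.Set.mem_ofList])
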